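-- pv_equiv track=rewrite | github.com/Samyak008/minorprojo | src/rag_gym.py | _ensure_source_balance
-- ===== SOURCE A (Python) =====
-- from collections import defaultdict
--
-- def _ensure_source_balance(papers, min_per_source=2, max_total=30):
--     """
--     Ensure balanced representation from different sources
--
--     Args:
--         papers (list): Paper dictionaries
--         min_per_source (int): Minimum papers per source
--         max_total (int): Maximum total papers
--
--     Returns:
--         list: Balanced papers
--     """
--     # Group papers by source
--     source_groups = defaultdict(list)
--     for paper in papers:
--         source = paper.get('source', 'unknown')
--         source_groups[source].append(paper)
--
--     # Ensure minimum representation from each source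
--     balanced_results = []
--     for source, source_papers in source_groups.items():
--         # Take minimum papers per source (or all if fewer available)
--         source_count = min(min_per_source, len(source_papers))
--         balanced_results.extend(source_papers[:source_count])
--
--     # If we have space for more papers, add them while maintaining balance
--     remaining_slots = max_total - len(balanced_results)
--     if remaining_slots > 0:
--         # Create lists of remaining papers by source
--         remaining_by_source = {
--             source: papers[min_per_source:]
--             for source, papers in source_groups.items()
--             if len(papers) > min_per_source
--         }
--
--         # Add papers in round-robin fashion until we reach max_total
--         while remaining_slots > 0 and remaining_by_source:
--             for source in list(remaining_by_source.keys()):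
--                 if not remaining_by_source[source]:
--                     del remaining_by_source[source]
--                     continue
--
--                 # Add one paper from this source
--                 balanced_results.append(remaining_by_source[source].pop(0))
--                 remaining_slots -= 1
--
--                 if remaining_slots <= 0:
--                     break
--
--     return balanced_results
-- ===== SOURCE B (Python) =====
-- def _round_robin(lists):
--     """Column-by-column flatten: first element of every list, then second, ..."""
--     out = []
--     i = 0
--     while True:
--         column = [l[i] for l in lists if i < len(l)]
--         if not column:
--             break
--         out.extend(column)
--         i += 1
--     return out
--
--
-- def _ensure_source_balance(papers, min_per_source=2, max_total=30):
--     """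
--     Ensure balanced representation from different sources
--
--     Args:
--         papers (list): Paper dictionaries
--         min_per_source (int): Minimum papers per source
--         max_total (int): Maximum total papers
--
--     Returns:
--         list: Balanced papers
--     """
--     # Group papers by source (insertion order preserved)
--     groups = {}
--     for paper in papers:
--         groups.setdefault(paper.get('source', 'unknown'), []).append(paper)
--
--     # Minimum representation from each source
--     balanced = []
--     for group in groups.values():
--         balanced.extend(group[:min(min_per_source, len(group))])
--
--     # Fill the remaining slots round-robin from the leftover tails
--     remaining_slots = max_total - len(balanced)
--     if remaining_slots > 0:
--         tails = [g[min_per_source:] for g in groups.values() if len(g) > min_per_source]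
--         balanced.extend(_round_robin(tails)[:remaining_slots])
--     return balanced
-- ===== Notes on version B (the rewrite author's own statement) =====
-- stated objective: simpler
-- what changed: Phase two's stateful while-loop over a dict of queues (pop(0), del, a countdown with break) is replaced by building the round-robin order once as a column-by-column flatten of the leftover tails and extending with its first remaining_slots elements.
import Mathlib
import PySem

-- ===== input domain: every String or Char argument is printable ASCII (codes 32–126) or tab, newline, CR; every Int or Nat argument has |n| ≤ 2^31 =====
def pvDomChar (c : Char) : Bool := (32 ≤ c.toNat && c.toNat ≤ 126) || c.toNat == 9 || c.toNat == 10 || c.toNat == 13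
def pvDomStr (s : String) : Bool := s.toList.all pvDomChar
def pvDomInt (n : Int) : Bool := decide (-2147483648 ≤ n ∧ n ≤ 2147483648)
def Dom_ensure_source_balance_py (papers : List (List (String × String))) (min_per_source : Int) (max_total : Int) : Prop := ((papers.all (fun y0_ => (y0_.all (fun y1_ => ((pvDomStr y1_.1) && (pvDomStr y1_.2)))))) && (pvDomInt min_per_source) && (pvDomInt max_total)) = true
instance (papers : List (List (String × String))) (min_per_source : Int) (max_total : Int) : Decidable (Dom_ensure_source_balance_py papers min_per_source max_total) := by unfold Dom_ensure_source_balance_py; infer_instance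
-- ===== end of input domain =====

-- B replaces A's mutating round-robin loop (dict of queues, pop(0)/del while counting down
-- slots) by building the round-robin order once, column by column, and taking a prefix
-- (objective: simpler). Neither version mutates its arguments.

-- ===== PORT A =====

-- paper.get('source', 'unknown')  (shared by both ports: the same line occurs in both Pythons)
def pvSrc (p : List (String × String)) : String :=
  PySem.Dict.getD (PySem.Dict.mk p) "source" "unknown"

-- the body of 'for source in list(remaining_by_source.keys()): …' (one pass of A's while loop);
-- early return = Python's 'break' when remaining_slots hits 0
def pvPassA (ks : List String) (d : PySem.Dict String (List (List (String × String))))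
    (acc : List (List (String × String))) (s : Int) :
    PySem.Dict String (List (List (String × String))) × List (List (String × String)) × Int :=
  match ks with
  | [] => (d, acc, s)
  | k :: ks =>
    match d.get? k with
    | none => pvPassA ks d acc s            -- unreachable (keys are a snapshot of d)
    | some [] => pvPassA ks (d.erase k) acc s      -- 'if not …: del …; continue'
    | some (p :: rest) =>                   -- '….pop(0)' + append + decrement
      let d' := d.insert k rest
      let acc' := acc ++ [p]
      let s' := s - 1
      if s' ≤ 0 then (d', acc', s') else pvPassA ks d' acc' s'

-- fuel bound for A's while loop: one pass always consumes at least one unit of this measure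
def pvMeasure (es : List (String × List (List (String × String)))) : Nat :=
  (es.map (fun e => e.2.length + 1)).sum

-- 'while remaining_slots > 0 and remaining_by_source: …' ; fuel is only a totality guard,
-- pvMeasure d.items passes always suffice (proved below)
def pvLoopA (fuel : Nat) (d : PySem.Dict String (List (List (String × String))))
    (acc : List (List (String × String))) (s : Int) : List (List (String × String)) :=
  match fuel with
  | 0 => acc
  | fuel + 1 =>
    if 0 < s ∧ d.items ≠ [] then
      let r := pvPassA d.keys d acc s
      pvLoopA fuel r.1 r.2.1 r.2.2
    else acc

def ensure_source_balance_py (papers : List (List (String × String))) (min_per_source : Int) (max_total : Int) : List (List (String × String)) :=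
  -- source_groups = defaultdict(list); for paper in papers: source_groups[source].append(paper)
  let source_groups := papers.foldl
    (fun d p => PySem.Dict.modify d (pvSrc p) [] (fun g => g ++ [p])) PySem.Dict.empty
  -- for source, source_papers in source_groups.items(): balanced_results.extend(source_papers[:min(...)])
  let balanced_results := source_groups.items.foldl
    (fun acc e => acc ++ PySem.List.slice e.2 none (some (min min_per_source (e.2.length : Int)))) []
  let remaining_slots := max_total - (balanced_results.length : Int)
  if 0 < remaining_slots then
    -- remaining_by_source = {source: papers[min_per_source:] for … if len(papers) > min_per_source}
    let remaining_by_source :=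
      (source_groups.items.filter (fun e => min_per_source < (e.2.length : Int))).foldl
        (fun d e => d.insert e.1 (PySem.List.slice e.2 (some min_per_source) none)) PySem.Dict.empty
    pvLoopA (pvMeasure remaining_by_source.items) remaining_by_source balanced_results remaining_slots
  else balanced_results

-- ===== PORT B =====

-- _round_robin's 'while True' loop over the column index i; fuel is only a totality guard,
-- pvMaxLen columns always suffice (proved below)
def pvRR (fuel : Nat) (lists : List (List (List (String × String)))) (i : Nat) :
    List (List (String × String)) :=
  match fuel with
  | 0 => []
  | fuel + 1 =>
    let column := lists.filterMap (fun l => l[i]?)   -- [l[i] for l in lists if i < len(l)]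
    if column.isEmpty then [] else column ++ pvRR fuel lists (i + 1)

def pvMaxLen (lists : List (List (List (String × String)))) : Nat :=
  lists.foldl (fun a l => max a l.length) 0

def ensure_source_balance_py_alt (papers : List (List (String × String))) (min_per_source : Int) (max_total : Int) : List (List (String × String)) :=
  -- groups = {}; groups.setdefault(paper.get('source','unknown'), []).append(paper)
  let groups := papers.foldl
    (fun d p => PySem.Dict.modify d (pvSrc p) [] (fun g => g ++ [p])) PySem.Dict.empty
  -- for group in groups.values(): balanced.extend(group[:min(min_per_source, len(group))])
  let balanced := groups.values.foldl
    (fun acc g => acc ++ PySem.List.slice g none (some (min min_per_source (g.length : Int)))) []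
  let remaining_slots := max_total - (balanced.length : Int)
  if 0 < remaining_slots then
    -- tails = [g[min_per_source:] for g in groups.values() if len(g) > min_per_source]
    let tails := groups.values.filterMap
      (fun g => if min_per_source < (g.length : Int)
                then some (PySem.List.slice g (some min_per_source) none) else none)
    -- balanced.extend(_round_robin(tails)[:remaining_slots])  (remaining_slots > 0 here)
    balanced ++ (pvRR (pvMaxLen tails) tails 0).take remaining_slots.toNat
  else balanced

-- ===== PRECONDITION & SPEC =====
def Spec_ensure_source_balance_py (papers : List (List (String × String))) (min_per_source : Int) (max_total : Int) (out : List (List (String × String))) : Prop := out = ensure_source_balance_py_alt papers min_per_source max_total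
instance (papers : List (List (String × String))) (min_per_source : Int) (max_total : Int) (out : List (List (String × String))) : Decidable (Spec_ensure_source_balance_py papers min_per_source max_total out) := by unfold Spec_ensure_source_balance_py; infer_instance

-- ===== CLAIM (what is proved, stated in full; the proofs are below) =====
def Claim_equal_ensure_source_balance_py : Prop := ∀ (papers : List (List (String × String))) (min_per_source : Int) (max_total : Int), Dom_ensure_source_balance_py papers min_per_source max_total → Spec_ensure_source_balance_py papers min_per_source max_total (ensure_source_balance_py papers min_per_source max_total)

-- ===== LEMMAS AND PROOFS =====

-- list-level model of one pass of A's while loop (the dict is just its items list)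
def pvPassL (es : List (String × List (List (String × String))))
    (acc : List (List (String × String))) (s : Int) :
    List (String × List (List (String × String))) × List (List (String × String)) × Int :=
  match es with
  | [] => ([], acc, s)
  | (_, []) :: es => pvPassL es acc s
  | (k, p :: rest) :: es =>
    if s - 1 ≤ 0 then ((k, rest) :: es, acc ++ [p], s - 1)
    else
      let r := pvPassL es (acc ++ [p]) (s - 1)
      ((k, rest) :: r.1, r.2.1, r.2.2)

def pvLoopL (fuel : Nat) (es : List (String × List (List (String × String))))
    (acc : List (List (String × String))) (s : Int) : List (List (String × String)) :=
  match fuel with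
  | 0 => acc
  | fuel + 1 =>
    if 0 < s ∧ es ≠ [] then
      let r := pvPassL es acc s
      pvLoopL fuel r.1 r.2.1 r.2.2
    else acc

-- the heads column and the per-entry tails of one pass
def pvCol (es : List (String × List (List (String × String)))) : List (List (String × String)) :=
  es.filterMap (fun e => e.2.head?)

def pvTails (es : List (String × List (List (String × String)))) :
    List (String × List (List (String × String))) :=
  (es.filter (fun e => !e.2.isEmpty)).map (fun e => (e.1, e.2.tail))

theorem pvPassA_sim (todo : List (String × List (List (String × String)))) :
    ∀ (done : List (String × List (List (String × String))))
      (acc : List (List (String × String))) (s : Int),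
    ((done ++ todo).map Prod.fst).Nodup →
    pvPassA (todo.map Prod.fst) (PySem.Dict.mk (done ++ todo)) acc s
      = (PySem.Dict.mk (done ++ (pvPassL todo acc s).1),
         (pvPassL todo acc s).2.1, (pvPassL todo acc s).2.2) := by
  induction todo with
  | nil => intro done acc s _; simp [pvPassA, pvPassL]
  | cons e es ih =>
    intro done acc s hnd
    obtain ⟨k, g⟩ := e
    rw [List.map_append] at hnd
    obtain ⟨hnd1, hnd2, hdisj⟩ := List.nodup_append.mp hnd
    have hkmem : k ∈ ((k, g) :: es).map Prod.fst := by simp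
    have hkdone : ∀ x ∈ done, (x.1 == k) = false := by
      intro x hx
      have : x.1 ≠ k := hdisj x.1 (List.mem_map_of_mem hx) k hkmem
      simpa using this
    have hknes : k ∉ es.map Prod.fst := by
      rw [List.map_cons, List.nodup_cons] at hnd2
      exact hnd2.1
    have hkes : ∀ x ∈ es, (x.1 == k) = false := by
      intro x hx
      have : x.1 ≠ k := fun h => hknes (h ▸ List.mem_map_of_mem hx)
      simpa using this
    have hget : (PySem.Dict.mk (done ++ (k, g) :: es)).get? k = some g := by
      simp only [PySem.Dict.get?, List.find?_append]
      rw [List.find?_eq_none.mpr (fun x hx => by simp [hkdone x hx])]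
      simp
    cases g with
    | nil =>
      have herase : (PySem.Dict.mk (done ++ (k, []) :: es)).erase k
          = PySem.Dict.mk (done ++ es) := by
        apply PySem.Dict.ext
        simp only [PySem.Dict.erase, List.filter_append, List.filter_cons]
        rw [List.filter_eq_self.mpr (fun x hx => by simp [hkdone x hx]),
            List.filter_eq_self.mpr (fun x hx => by simp [hkes x hx])]
        simp
      have hndrec : ((done ++ es).map Prod.fst).Nodup := by
        have hsub : List.Sublist (done ++ es)
            (done ++ (k, ([] : List (List (String × String)))) :: es) :=
          ((List.sublist_cons_self _ es).append_left done)
        have hnd' : (List.map Prod.fst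
            (done ++ (k, ([] : List (List (String × String)))) :: es)).Nodup := by
          rw [List.map_append]; exact hnd
        exact (hsub.map Prod.fst).nodup hnd'
      simp only [List.map_cons, pvPassA, hget, herase, pvPassL]
      exact ih done acc s hndrec
    | cons p rest =>
      have hcont : (PySem.Dict.mk (done ++ (k, p :: rest) :: es)).contains k = true := by
        rw [PySem.Dict.contains_eq_isSome_get?, hget]; rfl
      have hins : (PySem.Dict.mk (done ++ (k, p :: rest) :: es)).insert k rest
          = PySem.Dict.mk (done ++ (k, rest) :: es) := by
        apply PySem.Dict.ext
        rw [PySem.Dict.items_insert_of_contains _ _ hcont]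
        show List.map _ (done ++ (k, p :: rest) :: es) = _
        rw [List.map_append, List.map_cons]
        rw [List.map_congr_left (fun x hx => by simp [hkdone x hx] : ∀ x ∈ done, _ = id x),
            List.map_id,
            List.map_congr_left (fun x hx => by simp [hkes x hx] : ∀ x ∈ es, _ = id x),
            List.map_id]
        simp
      simp only [List.map_cons, pvPassA, hget, hins, pvPassL]
      by_cases hs : s - 1 ≤ 0
      · simp [hs]
      · simp only [hs, if_false]
        have hkeys : ((done ++ [(k, rest)] ++ es).map Prod.fst)
            = ((done ++ (k, p :: rest) :: es).map Prod.fst) := by simp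
        have hndrec : (((done ++ [(k, rest)]) ++ es).map Prod.fst).Nodup := by
          rw [List.append_assoc]
          rw [List.append_assoc] at hkeys
          rw [hkeys, List.map_append]; exact hnd
        have := ih (done ++ [(k, rest)]) (acc ++ [p]) (s - 1) hndrec
        rw [List.append_assoc, List.singleton_append] at this
        rw [this]
        simp [List.append_assoc]

theorem pvPassL_keys_sublist (es : List (String × List (List (String × String)))) :
    ∀ acc s, List.Sublist ((pvPassL es acc s).1.map Prod.fst) (es.map Prod.fst) := by
  induction es with
  | nil => intro acc s; simp [pvPassL]
  | cons e es ih =>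
    intro acc s
    obtain ⟨k, g⟩ := e
    cases g with
    | nil => exact (ih acc s).trans (by simp)
    | cons p rest =>
      by_cases hs : s - 1 ≤ 0
      · simp [pvPassL, hs]
      · simpa [pvPassL, hs] using (ih (acc ++ [p]) (s - 1)).cons₂ k

theorem pvLoopA_eq_loopL (fuel : Nat) :
    ∀ (es : List (String × List (List (String × String)))) acc (s : Int),
    (es.map Prod.fst).Nodup →
    pvLoopA fuel (PySem.Dict.mk es) acc s = pvLoopL fuel es acc s := by
  induction fuel with
  | zero => intro es acc s _; simp [pvLoopA, pvLoopL]
  | succ fuel ih =>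
    intro es acc s hnd
    have hsim := pvPassA_sim es [] acc s (by simpa using hnd)
    simp only [List.nil_append] at hsim
    simp only [pvLoopA, pvLoopL]
    have hkeys : (PySem.Dict.mk es).keys = es.map Prod.fst := rfl
    rw [hkeys]
    by_cases hc : 0 < s ∧ es ≠ []
    · rw [if_pos hc, if_pos hc, hsim]
      exact ih _ _ _ (hnd.sublist (pvPassL_keys_sublist es acc s))
    · rw [if_neg hc, if_neg hc]

-- one-pass characterisations -----------------------------------------------

theorem pvPassL_small (es : List (String × List (List (String × String)))) :
    ∀ acc (s : Int), 0 < s → s ≤ ((pvCol es).length : Int) →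
    (pvPassL es acc s).2.1 = acc ++ (pvCol es).take s.toNat ∧ (pvPassL es acc s).2.2 = 0 := by
  induction es with
  | nil => intro acc s h1 h2; simp [pvCol] at h2; omega
  | cons e es ih =>
    intro acc s h1 h2
    obtain ⟨k, g⟩ := e
    cases g with
    | nil => simpa [pvPassL, pvCol] using ih acc s h1 (by simpa [pvCol] using h2)
    | cons p rest =>
      have hcol : pvCol ((k, p :: rest) :: es) = p :: pvCol es := by simp [pvCol]
      rw [hcol] at h2 ⊢
      by_cases hs : s - 1 ≤ 0
      · have hs1 : s = 1 := by omega
        simp [pvPassL, hs1]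
      · have hrec := ih (acc ++ [p]) (s - 1) (by omega)
          (by simp at h2 ⊢; omega)
        have ht : s.toNat = (s - 1).toNat + 1 := by omega
        simp only [pvPassL, hs, if_false]
        refine ⟨?_, hrec.2⟩
        rw [hrec.1, ht, List.take_succ_cons, List.append_assoc, List.singleton_append]

theorem pvPassL_big (es : List (String × List (List (String × String)))) :
    ∀ acc (s : Int), ((pvCol es).length : Int) < s →
    pvPassL es acc s = (pvTails es, acc ++ pvCol es, s - (pvCol es).length) := by
  induction es with
  | nil => intro acc s _; simp [pvPassL, pvCol, pvTails]
  | cons e es ih =>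
    intro acc s h
    obtain ⟨k, g⟩ := e
    cases g with
    | nil => simpa [pvPassL, pvCol, pvTails] using ih acc s (by simpa [pvCol] using h)
    | cons p rest =>
      have hcol : pvCol ((k, p :: rest) :: es) = p :: pvCol es := by simp [pvCol]
      rw [hcol] at h ⊢
      have hs : ¬ (s - 1 ≤ 0) := by simp at h; omega
      have hrec := ih (acc ++ [p]) (s - 1) (by simp at h ⊢; omega)
      simp only [pvPassL, hs, if_false, hrec, pvTails, List.filter_cons]
      simp only [List.isEmpty_cons, Bool.not_false, if_true]
      simp only [Prod.mk.injEq, List.map_cons]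
      refine ⟨rfl, ?_, ?_⟩
      · rw [List.append_assoc, List.singleton_append]
      · simp; omega

theorem pvMeasure_tails (es : List (String × List (List (String × String)))) :
    pvMeasure (pvTails es) + es.length ≤ pvMeasure es := by
  induction es with
  | nil => simp [pvMeasure, pvTails]
  | cons e es ih =>
    obtain ⟨k, g⟩ := e
    cases g with
    | nil => simp only [pvTails, pvMeasure, List.filter_cons] at *; simp at *; omega
    | cons p rest =>
      simp only [pvTails, pvMeasure, List.filter_cons] at *
      simp at *; omega

-- maxima of lengths ---------------------------------------------------------

theorem pvFoldlMax_le_iff (ls : List (List (List (String × String)))) :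
    ∀ (a n : Nat), ls.foldl (fun a l => max a l.length) a ≤ n ↔ a ≤ n ∧ ∀ l ∈ ls, l.length ≤ n := by
  induction ls with
  | nil => intro a n; simp
  | cons l ls ih =>
    intro a n
    simp only [List.foldl_cons, ih, Nat.max_le, List.mem_cons]
    constructor
    · rintro ⟨⟨h1, h2⟩, h3⟩
      exact ⟨h1, fun x hx => hx.elim (fun e => e ▸ h2) (h3 x)⟩
    · rintro ⟨h1, h2⟩
      exact ⟨⟨h1, h2 l (Or.inl rfl)⟩, fun x hx => h2 x (Or.inr hx)⟩

theorem pvMaxLen_le_iff (ls : List (List (List (String × String)))) (n : Nat) :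
    pvMaxLen ls ≤ n ↔ ∀ l ∈ ls, l.length ≤ n := by
  simp [pvMaxLen, pvFoldlMax_le_iff]

-- pvRR facts ----------------------------------------------------------------

theorem pvRR_col_nil (f : Nat) (ls : List (List (List (String × String)))) (i : Nat)
    (h : ls.filterMap (fun l => l[i]?) = []) : pvRR f ls i = [] := by
  cases f <;> simp [pvRR, h]

theorem pvRR_nil (f : Nat) (i : Nat) : pvRR f [] i = [] := by
  cases f <;> simp [pvRR]

theorem pvRR_shift (f : Nat) :
    ∀ (ls : List (List (List (String × String)))) (i : Nat),
    pvRR f ls (i + 1) = pvRR f (ls.map List.tail) i := by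
  induction f with
  | zero => intro ls i; simp [pvRR]
  | succ f ih =>
    intro ls i
    have hcol : (ls.map List.tail).filterMap (fun l => l[i]?)
        = ls.filterMap (fun l => l[i + 1]?) := by
      rw [List.filterMap_map]
      exact List.filterMap_congr (fun l _ => by simp [List.getElem?_tail])
    simp only [pvRR, hcol, ih]

theorem pvRR_filter (f : Nat) :
    ∀ (ls : List (List (List (String × String)))) (i : Nat),
    pvRR f (ls.filter (fun l => !l.isEmpty)) i = pvRR f ls i := by
  induction f with
  | zero => intro ls i; simp [pvRR]
  | succ f ih =>
    intro ls i
    have hcol : (ls.filter (fun l => !l.isEmpty)).filterMap (fun l => l[i]?)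
        = ls.filterMap (fun l => l[i]?) := by
      induction ls with
      | nil => simp
      | cons l ls ihl =>
        cases l with
        | nil => simpa [List.filterMap_cons] using ihl
        | cons a t => simp [List.filterMap_cons, ihl]
    simp only [pvRR, hcol, ih]

theorem pvFilter_map_tail (ls : List (List (List (String × String)))) :
    ((ls.filter (fun l => !l.isEmpty)).map List.tail).filter (fun l => !l.isEmpty)
      = (ls.map List.tail).filter (fun l => !l.isEmpty) := by
  induction ls with
  | nil => rfl
  | cons l ls ih =>
    cases l <;> simp [List.filter_cons, ih]

-- the main loop lemma -------------------------------------------------------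

theorem pvLoopL_nonpos (f : Nat) (es : List (String × List (List (String × String))))
    (acc : List (List (String × String))) (s : Int) (h : s ≤ 0) :
    pvLoopL f es acc s = acc := by
  cases f with
  | zero => rfl
  | succ f => simp [pvLoopL]; omega

theorem pvLoopL_nil (f : Nat) (acc : List (List (String × String))) (s : Int) :
    pvLoopL f [] acc s = acc := by
  cases f <;> simp [pvLoopL]

theorem pvCol_eq (es : List (String × List (List (String × String)))) :
    (es.map Prod.snd).filterMap (fun l => l[0]?) = pvCol es := by
  rw [List.filterMap_map]
  exact List.filterMap_congr (fun e _ => by obtain ⟨k, g⟩ := e; cases g <;> simp)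

theorem pvTails_snd (es : List (String × List (List (String × String)))) :
    (pvTails es).map Prod.snd
      = ((es.map Prod.snd).filter (fun l => !l.isEmpty)).map List.tail := by
  simp only [pvTails, List.map_map, List.filter_map]
  rfl

theorem pvLoopL_eq_rr (fuel : Nat) :
    ∀ (es : List (String × List (List (String × String)))) acc (s : Int) (f : Nat),
    pvMeasure es ≤ fuel → pvMaxLen (es.map Prod.snd) ≤ f →
    pvLoopL fuel es acc s = acc ++ (pvRR f (es.map Prod.snd) 0).take s.toNat := by
  induction fuel with
  | zero =>
    intro es acc s f hm _
    have hes : es = [] := by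
      cases es with
      | nil => rfl
      | cons e es => simp [pvMeasure] at hm
    subst hes
    simp [pvLoopL, pvRR_nil]
  | succ fuel ih =>
    intro es acc s f hm hf
    by_cases hs : 0 < s
    case neg =>
      rw [pvLoopL_nonpos _ _ _ _ (by omega)]
      have : s.toNat = 0 := by omega
      simp [this]
    case pos =>
    by_cases hes : es = []
    · subst hes; simp [pvLoopL_nil, pvRR_nil]
    have hcond : (0 < s ∧ es ≠ []) := ⟨hs, hes⟩
    simp only [pvLoopL, hcond, and_self, if_true, ne_eq, not_false_eq_true]
    by_cases hcol : pvCol es = []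
    · -- every queue is empty: the pass deletes everything, nothing is emitted
      have hbig := pvPassL_big es acc s (by simp [hcol]; omega)
      have htails : pvTails es = [] := by
        have hall : ∀ e ∈ es, e.2.head? = none := by
          simpa [pvCol, List.filterMap_eq_nil_iff] using hcol
        simp only [pvTails, List.map_eq_nil_iff, List.filter_eq_nil_iff]
        intro e he
        have := hall e he
        cases h2 : e.2 with
        | nil => simp
        | cons x xs => rw [h2] at this; simp at this
      rw [hbig, hcol, htails]
      simp only [List.append_nil, List.length_nil]
      rw [pvLoopL_nil]
      rw [pvRR_col_nil f _ 0 (by rw [pvCol_eq]; exact hcol)]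
      simp
    · -- at least one head: f must be positive
      obtain ⟨f', rfl⟩ : ∃ f', f = f' + 1 := by
        cases f with
        | zero =>
          exfalso
          have hall := (pvMaxLen_le_iff _ 0).mp hf
          apply hcol
          simp only [pvCol, List.filterMap_eq_nil_iff]
          intro e he
          have hlen0 : e.2.length ≤ 0 := hall e.2 (List.mem_map_of_mem he)
          cases h2 : e.2 with
          | nil => simp
          | cons x xs => rw [h2] at hlen0; simp at hlen0
        | succ f' => exact ⟨f', rfl⟩
      have hrr : pvRR (f' + 1) (es.map Prod.snd) 0
          = pvCol es ++ pvRR f' (es.map Prod.snd) 1 := by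
        simp only [pvRR, pvCol_eq]
        rw [if_neg (by simp [hcol])]
      by_cases hsc : s ≤ ((pvCol es).length : Int)
      · -- the pass is cut short: exactly s papers are appended, slots hit 0
        have hsmall := pvPassL_small es acc s hs hsc
        rw [hsmall.1, hsmall.2]
        rw [pvLoopL_nonpos _ _ _ _ le_rfl]
        rw [hrr]
        rw [List.take_append_of_le_length (by omega)]
      · -- a full pass: one whole column is appended, then recurse on the tails
        have hbig := pvPassL_big es acc s (by omega)
        rw [hbig]
        have hmeas : pvMeasure (pvTails es) ≤ fuel := by
          have h1 := pvMeasure_tails es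
          have h2 : 1 ≤ es.length := by
            cases es with
            | nil => exact absurd rfl hes
            | cons _ _ => simp
          omega
        have hmax : pvMaxLen ((pvTails es).map Prod.snd) ≤ f' := by
          rw [pvMaxLen_le_iff]
          intro l hl
          rw [pvTails_snd] at hl
          obtain ⟨l', hl', rfl⟩ := List.mem_map.mp hl
          have hl'mem := List.mem_of_mem_filter hl'
          have hlen : l'.length ≤ f' + 1 := (pvMaxLen_le_iff _ _).mp hf l' hl'mem
          have hne : l' ≠ [] := by
            have := List.of_mem_filter hl'
            simpa [List.isEmpty_iff] using this
          have : 1 ≤ l'.length := by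
            cases l' with
            | nil => exact absurd rfl hne
            | cons _ _ => simp
          simp only [List.length_tail]
          omega
        rw [ih _ _ _ _ hmeas hmax]
        rw [hrr]
        have hshift : pvRR f' (es.map Prod.snd) 1 = pvRR f' ((pvTails es).map Prod.snd) 0 := by
          rw [pvRR_shift f' (es.map Prod.snd) 0]
          rw [← pvRR_filter f' ((es.map Prod.snd).map List.tail) 0]
          rw [← pvRR_filter f' ((pvTails es).map Prod.snd) 0]
          rw [pvTails_snd, pvFilter_map_tail]
        rw [← hshift]
        rw [List.take_append,
            List.take_of_length_le (by omega : (pvCol es).length ≤ s.toNat)]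
        have htn : s.toNat - (pvCol es).length = (s - ((pvCol es).length : Int)).toNat := by omega
        rw [htn, List.append_assoc]

-- (q e) below is the filter 'len(g) > min_per_source'
theorem pvFilterMap_ite (l : List (String × List (List (String × String))))
    (p : String × List (List (String × String)) → Prop) [DecidablePred p]
    (g : String × List (List (String × String)) → List (List (String × String))) :
    l.filterMap (fun e => if p e then some (g e) else none)
      = (l.filter (fun e => decide (p e))).map g := by
  induction l with
  | nil => rfl
  | cons e l ih =>
    by_cases h : p e <;> simp [h, ih]

-- ===== VERDICT (by name: the statement is the Claim_ definition above) =====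
theorem ensure_source_balance_py_spec : Claim_equal_ensure_source_balance_py := by
  intro papers mps mt _hdom
  unfold Spec_ensure_source_balance_py ensure_source_balance_py ensure_source_balance_py_alt
  simp only [PySem.Dict.values, List.foldl_map, List.filterMap_map, Function.comp_def]
  set G := papers.foldl (fun d p => PySem.Dict.modify d (pvSrc p) [] (fun g => g ++ [p]))
      PySem.Dict.empty with hGdef
  set bal := G.items.foldl
      (fun acc e => acc ++ PySem.List.slice e.2 none (some (min mps (e.2.length : Int)))) []
      with hbaldef
  by_cases hrs : 0 < mt - (bal.length : Int)
  case neg =>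
    rw [if_neg hrs, if_neg hrs]
  case pos =>
  rw [if_pos hrs, if_pos hrs]
  have hkeysG : G.keys.Nodup := by
    exact PySem.Dict.nodup_keys_foldl_modify_key papers pvSrc []
      (fun _ p => fun g => g ++ [p]) PySem.Dict.empty (by simp)
  have hnditems : (G.items.map Prod.fst).Nodup := by
    simpa [PySem.Dict.keys] using hkeysG
  set L := G.items.filter (fun e => decide (mps < (e.2.length : Int))) with hLdef
  set RL := L.map (fun e => (e.1, PySem.List.slice e.2 (some mps) none)) with hRLdef
  have hLnd : (L.map Prod.fst).Nodup :=
    hnditems.sublist (List.filter_sublist.map Prod.fst)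
  have hR : (L.foldl (fun d e => d.insert e.1 (PySem.List.slice e.2 (some mps) none))
      PySem.Dict.empty) = PySem.Dict.mk RL := by
    apply PySem.Dict.ext
    refine (PySem.Dict.items_foldl_insert_fresh L Prod.fst
      (fun e => PySem.List.slice e.2 (some mps) none) PySem.Dict.empty
      (fun a _ => PySem.Dict.contains_empty _) hLnd).trans ?_
    simp [hRLdef, PySem.Dict.empty]
  have hRLkeys : (RL.map Prod.fst).Nodup := by
    rw [hRLdef, List.map_map]
    exact hLnd
  have hT : G.items.filterMap
      (fun e => if mps < ((e.2.length : Int)) then some (PySem.List.slice e.2 (some mps) none) else none)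
      = RL.map Prod.snd := by
    rw [pvFilterMap_ite G.items (fun e => mps < (e.2.length : Int))
      (fun e => PySem.List.slice e.2 (some mps) none)]
    rw [hRLdef, List.map_map, hLdef]
    exact List.map_congr_left fun e _ => rfl
  rw [hR]
  rw [pvLoopA_eq_loopL _ RL bal _ hRLkeys]
  rw [pvLoopL_eq_rr _ RL bal _ (pvMaxLen (RL.map Prod.snd)) le_rfl le_rfl]
  rw [hT]
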